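-- pv_equiv track=rewrite | github.com/bitizen248/advent-of-code-solutions | day_1/part_2.py | is_number_substring
-- ===== SOURCE A (Python) =====
-- numbers = {
--     "zero": 0,
--     "one": 1,
--     "two": 2,
--     "three": 3,
--     "four": 4,
--     "five": 5,
--     "six": 6,
--     "seven": 7,
--     "eight": 8,
--     "nine": 9,
-- }
--
-- def is_number_substring(line, ends_with=False):
--     for number in numbers.keys():
--         if ends_with:
--             if number.endswith(line):
--                 return True
--         else:
--             if number.startswith(line):
--                 return True
--     return False
-- ===== SOURCE B (Python) =====
-- numbers = {
--     "zero": 0,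
--     "one": 1,
--     "two": 2,
--     "three": 3,
--     "four": 4,
--     "five": 5,
--     "six": 6,
--     "seven": 7,
--     "eight": 8,
--     "nine": 9,
-- }
--
-- _PREFIXES = {w[:i] for w in numbers.keys() for i in range(len(w) + 1)}
-- _SUFFIXES = {w[i:] for w in numbers.keys() for i in range(len(w) + 1)}
--
-- def is_number_substring(line, ends_with=False):
--     return line in (_SUFFIXES if ends_with else _PREFIXES)
-- ===== Notes on version B (the rewrite author's own statement) =====
-- stated objective: idiomatic
-- what changed: Replaces the per-call scan over the ten number words with two module-level precomputed sets of all prefixes/suffixes of the words, so each call is a single set-membership lookup with no loop.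
import Mathlib
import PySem

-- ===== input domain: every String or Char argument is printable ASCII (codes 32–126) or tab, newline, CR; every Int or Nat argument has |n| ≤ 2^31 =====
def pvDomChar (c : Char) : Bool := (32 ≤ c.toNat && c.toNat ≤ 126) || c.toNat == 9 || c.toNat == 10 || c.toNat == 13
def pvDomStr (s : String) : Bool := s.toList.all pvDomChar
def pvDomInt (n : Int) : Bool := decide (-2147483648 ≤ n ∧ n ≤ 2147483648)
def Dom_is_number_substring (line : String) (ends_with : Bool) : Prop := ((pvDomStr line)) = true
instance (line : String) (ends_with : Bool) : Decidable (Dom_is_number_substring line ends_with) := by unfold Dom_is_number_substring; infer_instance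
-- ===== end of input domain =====

-- B replaces A's per-call loop over the ten number words with one membership test
-- against precomputed sets of all their prefixes/suffixes (idiomatic; same observable behaviour).

-- ===== PORT A =====
def pvNumbers : PySem.Dict String Int := PySem.Dict.mk
  [("zero", 0), ("one", 1), ("two", 2), ("three", 3), ("four", 4),
   ("five", 5), ("six", 6), ("seven", 7), ("eight", 8), ("nine", 9)]

def pvLoopA (line : String) (ends_with : Bool) : List String → Bool
  | [] => false
  | number :: rest =>
    if ends_with then
      if PySem.Str.endswith number line then true else pvLoopA line ends_with rest
    else
      if PySem.Str.startswith number line then true else pvLoopA line ends_with rest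

def is_number_substring (line : String) (ends_with : Bool) : Bool :=
  pvLoopA line ends_with (PySem.Dict.keys pvNumbers)

-- ===== PORT B =====
def pvNumbersB : PySem.Dict String Int := PySem.Dict.mk
  [("zero", 0), ("one", 1), ("two", 2), ("three", 3), ("four", 4),
   ("five", 5), ("six", 6), ("seven", 7), ("eight", 8), ("nine", 9)]

def pvPrefixes : PySem.Set String :=
  PySem.Set.ofList ((PySem.Dict.keys pvNumbersB).flatMap (fun w =>
    (PySem.List.pyRange 0 (PySem.Str.len w + 1) 1).map (fun i => PySem.Str.slice w none (some i))))

def pvSuffixes : PySem.Set String :=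
  PySem.Set.ofList ((PySem.Dict.keys pvNumbersB).flatMap (fun w =>
    (PySem.List.pyRange 0 (PySem.Str.len w + 1) 1).map (fun i => PySem.Str.slice w (some i) none)))

def is_number_substring_alt (line : String) (ends_with : Bool) : Bool :=
  PySem.Set.contains (if ends_with then pvSuffixes else pvPrefixes) line

-- ===== PRECONDITION & SPEC =====
def Spec_is_number_substring (line : String) (ends_with : Bool) (out : Bool) : Prop := out = is_number_substring_alt line ends_with
instance (line : String) (ends_with : Bool) (out : Bool) : Decidable (Spec_is_number_substring line ends_with out) := by unfold Spec_is_number_substring; infer_instance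

-- ===== CLAIM (what is proved, stated in full; the proofs are below) =====
def Claim_equal_is_number_substring : Prop := ∀ (line : String) (ends_with : Bool), Dom_is_number_substring line ends_with → Spec_is_number_substring line ends_with (is_number_substring line ends_with)

-- ===== LEMMAS AND PROOFS =====

theorem pvLoopA_eq_any (line : String) (ends_with : Bool) (ws : List String) :
    pvLoopA line ends_with ws
      = ws.any (fun w => if ends_with then PySem.Str.endswith w line else PySem.Str.startswith w line) := by
  induction ws with
  | nil => rfl
  | cons w rest ih =>
    simp only [pvLoopA, List.any_cons, ← ih]
    by_cases h : ends_with = true <;> simp [h]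

theorem mem_map_toList (S : List String) (line : String) :
    line ∈ S ↔ line.toList ∈ S.map String.toList := by
  rw [List.mem_map_of_injective]
  intro a b h
  exact String.toList_inj.mp h

set_option maxRecDepth 40000 in
theorem is_number_substring_spec_aux (line : String) (ends_with : Bool) :
    is_number_substring line ends_with = is_number_substring_alt line ends_with := by
  cases ends_with
  · have hA : is_number_substring line false = true
        ↔ line.toList ∈ (PySem.Dict.keys pvNumbers).flatMap (fun w => w.toList.inits) := by
      rw [is_number_substring, pvLoopA_eq_any]
      simp only [if_neg (by decide : ¬ (false = true)), List.any_eq_true, List.mem_flatMap]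
      constructor
      · rintro ⟨w, hw, hsw⟩
        exact ⟨w, hw, (List.mem_inits _ _).mpr
          ((PySem.Chars.startswith_iff _ _).mp (by simpa using hsw))⟩
      · rintro ⟨w, hw, hmem⟩
        exact ⟨w, hw, by
          simpa using (PySem.Chars.startswith_iff _ _).mpr ((List.mem_inits _ _).mp hmem)⟩
    have hB : is_number_substring_alt line false = true
        ↔ line.toList ∈ pvPrefixes.map String.toList := by
      rw [is_number_substring_alt, if_neg (by decide : ¬ (false = true)),
        PySem.Set.contains]
      rw [List.contains_iff_mem]
      exact mem_map_toList _ _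
    have hsets : ∀ l : List Char,
        l ∈ (PySem.Dict.keys pvNumbers).flatMap (fun w => w.toList.inits)
          ↔ l ∈ pvPrefixes.map String.toList := by
      intro l
      constructor
      · intro h; exact (by decide :
          (PySem.Dict.keys pvNumbers).flatMap (fun w => w.toList.inits)
            ⊆ pvPrefixes.map String.toList) h
      · intro h; exact (by decide :
          pvPrefixes.map String.toList
            ⊆ (PySem.Dict.keys pvNumbers).flatMap (fun w => w.toList.inits)) h
    rw [Bool.eq_iff_iff, hA, hB]
    exact hsets _
  · have hA : is_number_substring line true = true
        ↔ line.toList ∈ (PySem.Dict.keys pvNumbers).flatMap (fun w => w.toList.tails) := by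
      rw [is_number_substring, pvLoopA_eq_any]
      simp only [List.any_eq_true, List.mem_flatMap]
      constructor
      · rintro ⟨w, hw, hsw⟩
        exact ⟨w, hw, (List.mem_tails _ _).mpr
          ((PySem.Chars.endswith_iff _ _).mp (by simpa using hsw))⟩
      · rintro ⟨w, hw, hmem⟩
        exact ⟨w, hw, by
          simpa using (PySem.Chars.endswith_iff _ _).mpr ((List.mem_tails _ _).mp hmem)⟩
    have hB : is_number_substring_alt line true = true
        ↔ line.toList ∈ pvSuffixes.map String.toList := by
      rw [is_number_substring_alt, if_pos rfl, PySem.Set.contains]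
      rw [List.contains_iff_mem]
      exact mem_map_toList _ _
    have hsets : ∀ l : List Char,
        l ∈ (PySem.Dict.keys pvNumbers).flatMap (fun w => w.toList.tails)
          ↔ l ∈ pvSuffixes.map String.toList := by
      intro l
      constructor
      · intro h; exact (by decide :
          (PySem.Dict.keys pvNumbers).flatMap (fun w => w.toList.tails)
            ⊆ pvSuffixes.map String.toList) h
      · intro h; exact (by decide :
          pvSuffixes.map String.toList
            ⊆ (PySem.Dict.keys pvNumbers).flatMap (fun w => w.toList.tails)) h
    rw [Bool.eq_iff_iff, hA, hB]
    exact hsets _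

-- ===== VERDICT (by name: the statement is the Claim_ definition above) =====
theorem is_number_substring_spec : Claim_equal_is_number_substring := by
  intro line ends_with _
  exact is_number_substring_spec_aux line ends_with
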